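-- pv_equiv track=rewrite | github.com/HPRIOR/FOC-Exam-Helpers | DecimalToFPIEEE.py | split_into_groups_four
-- ===== SOURCE A (Python) =====
-- def split_into_groups_four(s):
--     string_return = ""
--     s = s[::-1]
--     for index, ch in enumerate(s):
--         if (index) % 4 == 0:
--             string_return += " " + ch
--         else:
--             string_return += ch
--     return string_return[::-1]
-- ===== SOURCE B (Python) =====
-- def split_into_groups_four(s):
--     out = ""
--     while s:
--         out = s[-4:] + " " + out
--         s = s[:-4]
--     return out
-- ===== Notes on version B (the rewrite author's own statement) =====
-- stated objective: simpler
-- what changed: Replaced A's reverse-the-string / enumerate-every-character / reverse-again loop with a short back-to-front loop that peels four-character chunks off the right end with slices (out = s[-4:] + " " + out; s = s[:-4]).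
import Mathlib
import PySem

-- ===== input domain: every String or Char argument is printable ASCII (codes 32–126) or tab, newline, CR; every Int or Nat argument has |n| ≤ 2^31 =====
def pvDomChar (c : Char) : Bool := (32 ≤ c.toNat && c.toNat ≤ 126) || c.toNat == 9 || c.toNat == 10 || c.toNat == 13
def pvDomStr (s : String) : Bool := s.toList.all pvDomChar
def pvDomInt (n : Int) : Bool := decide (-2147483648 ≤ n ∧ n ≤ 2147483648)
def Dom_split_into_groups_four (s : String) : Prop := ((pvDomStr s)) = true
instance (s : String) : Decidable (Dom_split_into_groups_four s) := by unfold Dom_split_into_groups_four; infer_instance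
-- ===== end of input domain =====

-- B replaces A's reverse / per-character loop / re-reverse with a back-to-front loop that
-- peels four-character chunks off the right end (objective: simpler).

-- ===== PORT A =====
def split_into_groups_four (s : String) : String :=
  -- s = s[::-1]
  let rev := (PySem.List.slice? s.toList none none (-1)).getD []
  -- for index, ch in enumerate(s): string_return += " " + ch  /  string_return += ch
  let out := (PySem.List.enumerate rev 0).foldl
    (fun acc p => if PySem.Int.mod p.1 4 == 0 then acc ++ (' ' :: [p.2]) else acc ++ [p.2])
    ([] : List Char)
  -- return string_return[::-1]
  String.ofList ((PySem.List.slice? out none none (-1)).getD [])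

-- ===== PORT B =====
-- while s: out = s[-4:] + " " + out; s = s[:-4]   (slices ported via PySem.List.slice, exact;
-- fuel = initial length only bounds the iteration count so the loop is structural: each pass
-- shortens s by at least one character, so the fuel is never exhausted before s is empty)
def altLoop : Nat -> List Char -> List Char -> List Char
  | 0, _, acc => acc
  | fuel + 1, l, acc =>
    if l = [] then acc
    else altLoop fuel (PySem.List.slice l none (some (-4)))
                      (PySem.List.slice l (some (-4)) none ++ (' ' :: acc))

def split_into_groups_four_alt (s : String) : String :=
  String.ofList (altLoop s.toList.length s.toList [])

-- ===== PRECONDITION & SPEC =====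
def Spec_split_into_groups_four (s : String) (out : String) : Prop := out = split_into_groups_four_alt s
instance (s : String) (out : String) : Decidable (Spec_split_into_groups_four s out) := by unfold Spec_split_into_groups_four; infer_instance

-- ===== CLAIM (what is proved, stated in full; the proofs are below) =====
def Claim_equal_split_into_groups_four : Prop := ∀ (s : String), Dom_split_into_groups_four s → Spec_split_into_groups_four s (split_into_groups_four s)

-- ===== LEMMAS AND PROOFS =====

-- A's per-character emission, as a function of one enumerated pair
def emitA (p : Int × Char) : List Char :=
  if PySem.Int.mod p.1 4 == 0 then ' ' :: [p.2] else [p.2]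

theorem foldA_eq_flatMap (L : List (Int × Char)) (acc : List Char) :
    L.foldl (fun acc p => if PySem.Int.mod p.1 4 == 0 then acc ++ (' ' :: [p.2]) else acc ++ [p.2]) acc
      = acc ++ L.flatMap emitA := by
  have h : (fun (acc : List Char) (p : Int × Char) =>
      if PySem.Int.mod p.1 4 == 0 then acc ++ (' ' :: [p.2]) else acc ++ [p.2])
      = fun acc p => acc ++ emitA p := by
    funext acc p; unfold emitA; split <;> rfl
  rw [h, PySem.List.foldl_append_eq_flatMap]

theorem emitA_shift (i : Int) (c : Char) : emitA (i + 4, c) = emitA (i, c) := by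
  unfold emitA
  have h : PySem.Int.mod (i + 4) 4 = 0 ↔ PySem.Int.mod i 4 = 0 := by
    rw [PySem.Int.mod_eq_zero_iff_dvd, PySem.Int.mod_eq_zero_iff_dvd]
    omega
  by_cases hc : PySem.Int.mod i 4 = 0
  · simp
  · simp

theorem flatMap_shift (xs : List Char) (i : Int) :
    (PySem.List.enumerate xs (i + 4)).flatMap emitA
      = (PySem.List.enumerate xs i).flatMap emitA := by
  induction xs generalizing i with
  | nil => simp [PySem.List.enumerate_nil]
  | cons x xs ih =>
    rw [PySem.List.enumerate_cons, PySem.List.enumerate_cons]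
    simp only [List.flatMap_cons, emitA_shift]
    have : i + 4 + 1 = (i + 1) + 4 := by ring
    rw [this, ih]

-- one chunk of ≤ 4 characters starting at index 0 produces a leading space then the chunk
theorem flatMap_chunk (xs : List Char) (h1 : xs ≠ []) (h4 : xs.length ≤ 4) :
    (PySem.List.enumerate xs 0).flatMap emitA = ' ' :: xs := by
  have e0 : (PySem.Int.mod 0 4 == 0) = true := by decide
  have e1 : (PySem.Int.mod 1 4 == 0) = false := by decide
  have e2 : (PySem.Int.mod 2 4 == 0) = false := by decide
  have e3 : (PySem.Int.mod 3 4 == 0) = false := by decide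
  rcases xs with _ | ⟨a, _ | ⟨b, _ | ⟨c, _ | ⟨d, rest⟩⟩⟩⟩
  · exact absurd rfl h1
  · simp [PySem.List.enumerate_cons, PySem.List.enumerate_nil, emitA]
  · norm_num [PySem.List.enumerate_cons, PySem.List.enumerate_nil, emitA, e0, e1]
  · norm_num [PySem.List.enumerate_cons, PySem.List.enumerate_nil, emitA, e0, e1, e2]
  · have : rest = [] := List.length_eq_zero_iff.mp (by simp at h4; omega)
    subst this
    norm_num [PySem.List.enumerate_cons, PySem.List.enumerate_nil, emitA, e0, e1, e2, e3]

theorem main_lemma (fuel : Nat) (l acc : List Char) (hf : l.length ≤ fuel) :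
    ((PySem.List.enumerate l.reverse 0).flatMap emitA).reverse ++ acc = altLoop fuel l acc := by
  induction fuel generalizing l acc with
  | zero =>
    have hl : l = [] := List.length_eq_zero_iff.mp (by omega)
    subst hl; simp [altLoop, PySem.List.enumerate_nil]
  | succ f ih =>
    rcases eq_or_ne l [] with hl | hl
    · subst hl; simp [altLoop, PySem.List.enumerate_nil]
    · rw [altLoop, if_neg hl,
          PySem.List.slice_to_neg_ofNat l 4 (by omega),
          PySem.List.slice_from_neg_ofNat l 4 (by omega)]
      set k := l.length - 4 with hk
      have hlen : 0 < l.length := List.length_pos_iff.mpr hl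
      have hsplit : l = l.take k ++ l.drop k := (List.take_append_drop k l).symm
      have hdroplen : (l.drop k).length = l.length - k := List.length_drop ..
      have hdropne : l.drop k ≠ [] := by
        intro h; have := congrArg List.length h; simp [hdroplen] at this; omega
      have hdle : (l.drop k).length ≤ 4 := by omega
      have hrev : l.reverse = (l.drop k).reverse ++ (l.take k).reverse := by
        conv_lhs => rw [hsplit]
        rw [List.reverse_append]
      rw [hrev, PySem.List.enumerate_append, List.flatMap_append,
          flatMap_chunk _ (by simpa using hdropne) (by simpa using hdle)]
      have hshift : (PySem.List.enumerate (l.take k).reverse (0 + ((l.drop k).reverse.length : Int))).flatMap emitA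
          = (PySem.List.enumerate (l.take k).reverse 0).flatMap emitA := by
        rcases Nat.lt_or_ge l.length 4 with h4 | h4
        · have : l.take k = [] := by
            have : k = 0 := by omega
            simp [this]
          simp [this, PySem.List.enumerate_nil]
        · have : (0 : Int) + ((l.drop k).reverse.length : Int) = 0 + 4 := by
            simp [hdroplen]; omega
          rw [this, flatMap_shift]
      rw [hshift]
      have h2 := ih (l.take k) (l.drop k ++ (' ' :: acc)) (by simp [hk]; omega)
      rw [← h2]
      simp

-- ===== VERDICT (by name: the statement is the Claim_ definition above) =====
theorem split_into_groups_four_spec : Claim_equal_split_into_groups_four := by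
  intro s _
  unfold Spec_split_into_groups_four split_into_groups_four split_into_groups_four_alt
  simp only [PySem.List.slice?_none_none_neg_one, Option.getD_some]
  rw [foldA_eq_flatMap]
  simp only [List.nil_append]
  rw [← main_lemma s.toList.length s.toList [] le_rfl]
  simp
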